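-- pv_equiv track=rewrite | github.com/XV4DE/Advanced-Algorithms | Fourier Transform Python/logic.py | index_of_first_thing_to_deal_with
-- ===== SOURCE A (Python) =====
-- propositional_constants = ['a', 'b', 'c', 'd', 'e', 'f', 'g', 'h', 'i', 'j', 'k', 'l', 'm', 'n', 'o', 'p', 'q',
--                            'r', 's', 't', 'u', 'v', 'w', 'x', 'y', 'z']
--
-- def are_parens_balanced(phrase: str):
--     return phrase.count('(') == phrase.count(')')
--
-- def is_in_parens(idx: int, phrase: str):
--     return not are_parens_balanced(phrase[idx:])
--
-- def index_of_first_thing_to_deal_with(in_str: str):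
--     if len(in_str) == 0:
--         return -1
--
--     for i in range(len(in_str)):
--         if not is_in_parens(i, in_str) and in_str[i] != '~' and in_str[i] not in propositional_constants:
--             return i
--
--     for i in range(len(in_str)):
--         if not is_in_parens(i, in_str) and in_str[i] not in propositional_constants:
--             return i
--
--     for i in range(len(in_str)):
--         if not is_in_parens(i, in_str):
--             return i
--
--     return -1
-- ===== SOURCE B (Python) =====
-- def index_of_first_thing_to_deal_with(in_str: str):
--     # One pass: a running prefix count of parens makes every suffix-balance
--     # test O(1); record the first index in each priority class.
--     opens = in_str.count('(')
--     closes = in_str.count(')')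
--     po = pc = 0
--     first1 = first2 = first3 = -1
--     for i, ch in enumerate(in_str):
--         if opens - po == closes - pc:
--             if first3 < 0:
--                 first3 = i
--             if first2 < 0 and not ('a' <= ch <= 'z'):
--                 first2 = i
--             if first1 < 0 and not ('a' <= ch <= 'z') and ch != '~':
--                 first1 = i
--         if ch == '(':
--             po += 1
--         elif ch == ')':
--             pc += 1
--     if first1 >= 0:
--         return first1
--     if first2 >= 0:
--         return first2
--     return first3
-- ===== Notes on version B (the rewrite author's own statement) =====
-- stated objective: faster
-- what changed: A re-counts the parentheses of the whole suffix s[i:] for every index in up to three O(n^2) scans; B makes one pass keeping a running prefix paren count (so each suffix-balance test is O(1)) and records the first index of each of the three priority classes.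
import Mathlib
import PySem

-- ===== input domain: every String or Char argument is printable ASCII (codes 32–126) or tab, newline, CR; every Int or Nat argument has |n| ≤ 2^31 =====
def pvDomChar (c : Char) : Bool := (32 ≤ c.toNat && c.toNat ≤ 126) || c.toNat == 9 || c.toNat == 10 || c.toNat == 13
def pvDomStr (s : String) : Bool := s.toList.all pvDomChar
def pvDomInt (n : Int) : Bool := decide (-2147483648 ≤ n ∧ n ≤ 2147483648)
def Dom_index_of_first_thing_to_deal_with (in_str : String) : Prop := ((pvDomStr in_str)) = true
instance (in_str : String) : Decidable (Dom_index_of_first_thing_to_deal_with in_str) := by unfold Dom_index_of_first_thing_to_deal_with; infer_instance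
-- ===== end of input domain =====

-- B replaces A's per-index suffix re-count (quadratic) by one left-to-right pass with a
-- running prefix paren count, recording the first index of each priority class; same result.

-- ===== PORT A =====
def pvPropositionalConstants : List Char :=
  ['a', 'b', 'c', 'd', 'e', 'f', 'g', 'h', 'i', 'j', 'k', 'l', 'm', 'n', 'o', 'p', 'q',
   'r', 's', 't', 'u', 'v', 'w', 'x', 'y', 'z']

def pvAreParensBalanced (phrase : List Char) : Bool :=
  PySem.Chars.count phrase ['('] == PySem.Chars.count phrase [')']

def pvIsInParens (idx : Int) (phrase : List Char) : Bool :=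
  !(pvAreParensBalanced (PySem.List.slice phrase (some idx) none))

-- 'for i in range(n): if cond(i): return i' as structural recursion over the range list
def pvFindLoop (cond : Int → Bool) : List Int → Option Int
  | [] => none
  | i :: rest => if cond i then some i else pvFindLoop cond rest

def index_of_first_thing_to_deal_with (in_str : String) : Int :=
  let s := in_str.toList
  if s.length = 0 then -1
  else
    match pvFindLoop (fun i =>
        !pvIsInParens i s && !(PySem.List.pyGetD s i ' ' == '~')
          && !(pvPropositionalConstants.contains (PySem.List.pyGetD s i ' ')))
        (PySem.List.pyRange 0 s.length 1) with
    | some i => i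
    | none =>
      match pvFindLoop (fun i =>
          !pvIsInParens i s && !(pvPropositionalConstants.contains (PySem.List.pyGetD s i ' ')))
          (PySem.List.pyRange 0 s.length 1) with
      | some i => i
      | none =>
        match pvFindLoop (fun i => !pvIsInParens i s) (PySem.List.pyRange 0 s.length 1) with
        | some i => i
        | none => -1

-- ===== PORT B =====
-- loop body of Source B; the state is (i, po, pc, first1, first2, first3)
def pvStepB (opens closes : Int) (st : Int × Int × Int × Int × Int × Int) (ch : Char) :
    Int × Int × Int × Int × Int × Int :=
  let (i, po, pc, f1, f2, f3) := st
  let f3' := if opens - po == closes - pc then (if f3 < 0 then i else f3) else f3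
  let f2' := if opens - po == closes - pc then
      (if f2 < 0 && !('a' ≤ ch && ch ≤ 'z') then i else f2) else f2
  let f1' := if opens - po == closes - pc then
      (if f1 < 0 && !('a' ≤ ch && ch ≤ 'z') && !(ch == '~') then i else f1) else f1
  let po' := if ch == '(' then po + 1 else po
  let pc' := if !(ch == '(') && ch == ')' then pc + 1 else pc
  (i + 1, po', pc', f1', f2', f3')

def index_of_first_thing_to_deal_with_alt (in_str : String) : Int :=
  let s := in_str.toList
  let opens : Int := PySem.Chars.count s ['(']
  let closes : Int := PySem.Chars.count s [')']
  let r := s.foldl (pvStepB opens closes) (0, 0, 0, -1, -1, -1)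
  if 0 ≤ r.2.2.2.1 then r.2.2.2.1
  else if 0 ≤ r.2.2.2.2.1 then r.2.2.2.2.1
  else r.2.2.2.2.2

-- ===== PRECONDITION & SPEC =====
def Spec_index_of_first_thing_to_deal_with (in_str : String) (out : Int) : Prop := out = index_of_first_thing_to_deal_with_alt in_str
instance (in_str : String) (out : Int) : Decidable (Spec_index_of_first_thing_to_deal_with in_str out) := by unfold Spec_index_of_first_thing_to_deal_with; infer_instance

-- ===== CLAIM (what is proved, stated in full; the proofs are below) =====
def Claim_equal_index_of_first_thing_to_deal_with : Prop := ∀ (in_str : String), Dom_index_of_first_thing_to_deal_with in_str → Spec_index_of_first_thing_to_deal_with in_str (index_of_first_thing_to_deal_with in_str)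

-- ===== LEMMAS AND PROOFS =====

-- Chars.count with a single-character needle is List.count
theorem pv_count_go_single (c : Char) : ∀ (l : List Char) (fuel acc : Nat), l.length ≤ fuel →
    PySem.Chars.count.go [c] fuel l acc = acc + l.count c := by
  intro l
  induction l with
  | nil => intro fuel acc _; cases fuel <;> simp [PySem.Chars.count.go]
  | cons h t ih =>
    intro fuel acc hf
    cases fuel with
    | zero => simp at hf
    | succ f =>
      simp only [PySem.Chars.count.go]
      by_cases hc : c = h
      · subst hc
        simp [List.isPrefixOf, ih f (acc + 1) (by simpa using hf)]
        omega
      · simp [List.isPrefixOf, hc, ih f acc (by simpa using hf),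
          Ne.symm hc]

theorem pv_count_single (l : List Char) (c : Char) :
    PySem.Chars.count l [c] = l.count c := by
  simp [PySem.Chars.count, pv_count_go_single c l l.length 0 le_rfl]

-- balance of a suffix, and the character tests, as plain predicates
def pvBal (t : List Char) : Bool := t.count '(' == t.count ')'
def pvQ1 (c : Char) : Bool := !(c == '~') && !(pvPropositionalConstants.contains c)
def pvQ2 (c : Char) : Bool := !(pvPropositionalConstants.contains c)

-- the first position ≥ i of the suffix t whose own suffix is balanced and whose head passes q
def pvFirstQ (q : Char → Bool) : Nat → List Char → Option Nat
  | _, [] => none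
  | i, c :: t => if pvBal (c :: t) && q c then some i else pvFirstQ q (i + 1) t

theorem pv_consts_range (c : Char) :
    pvPropositionalConstants.contains c = ('a' ≤ c && c ≤ 'z') := by
  have hkey : ∀ d : Char, (c = d) ↔ (c.val.toNat = d.val.toNat) := by
    intro d
    constructor
    · rintro rfl; rfl
    · intro h; exact Char.ext (by exact UInt32.toNat_inj.mp h)
  rw [Bool.eq_iff_iff]
  simp only [pvPropositionalConstants, List.contains_eq_mem, List.mem_cons, List.not_mem_nil,
    or_false, decide_eq_true_eq, Bool.and_eq_true, hkey, Char.le_def, UInt32.le_iff_toNat_le]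
  simp only [show 'a'.val.toNat = 97 from rfl, show 'b'.val.toNat = 98 from rfl, show 'c'.val.toNat = 99 from rfl, show 'd'.val.toNat = 100 from rfl, show 'e'.val.toNat = 101 from rfl, show 'f'.val.toNat = 102 from rfl, show 'g'.val.toNat = 103 from rfl, show 'h'.val.toNat = 104 from rfl, show 'i'.val.toNat = 105 from rfl, show 'j'.val.toNat = 106 from rfl, show 'k'.val.toNat = 107 from rfl, show 'l'.val.toNat = 108 from rfl, show 'm'.val.toNat = 109 from rfl, show 'n'.val.toNat = 110 from rfl, show 'o'.val.toNat = 111 from rfl, show 'p'.val.toNat = 112 from rfl, show 'q'.val.toNat = 113 from rfl, show 'r'.val.toNat = 114 from rfl, show 's'.val.toNat = 115 from rfl, show 't'.val.toNat = 116 from rfl, show 'u'.val.toNat = 117 from rfl, show 'v'.val.toNat = 118 from rfl, show 'w'.val.toNat = 119 from rfl, show 'x'.val.toNat = 120 from rfl, show 'y'.val.toNat = 121 from rfl, show 'z'.val.toNat = 122 from rfl]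
  omega

theorem pv_isInParens_eq (s : List Char) (i : Nat) :
    pvIsInParens (i : Int) s = !pvBal (s.drop i) := by
  simp [pvIsInParens, pvAreParensBalanced, PySem.List.slice_from_natCast,
    pv_count_single, pvBal]

-- A's loop over range(i, len(s)) finds pvFirstQ on the suffix
theorem pv_loopA_eq (s : List Char) (q : Char → Bool) :
    ∀ (t : List Char) (i : Nat), t = s.drop i → i ≤ s.length →
      pvFindLoop (fun j => !pvIsInParens j s && q (PySem.List.pyGetD s j ' '))
          (PySem.List.pyRange (i : Int) (s.length : Int) 1)
        = (pvFirstQ q i t).map (fun n => (n : Int)) := by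
  intro t
  induction t with
  | nil =>
    intro i ht hi
    have : i = s.length := by
      have := congrArg List.length ht
      simp [List.length_drop] at this
      omega
    subst this
    rw [PySem.List.pyRange_one_eq_nil le_rfl]
    simp [pvFindLoop, pvFirstQ]
  | cons c t' ih =>
    intro i ht hi
    have hlt : i < s.length := by
      by_contra h
      have : s.drop i = [] := List.drop_eq_nil_of_le (by omega)
      rw [this] at ht; exact absurd ht (by simp)
    rw [PySem.List.pyRange_one_cons (by exact_mod_cast hlt)]
    have hget : PySem.List.pyGetD s (i : Int) ' ' = c := by
      rw [PySem.List.pyGetD_natCast]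
      have : s.getD i ' ' = (s.drop i).getD 0 ' ' := by
        rcases Nat.lt_or_ge i s.length with h | h
        · simp [List.getD, List.getElem?_drop]
        · omega
      rw [this, ← ht]; rfl
    have hdrop' : t' = s.drop (i + 1) := by
      have := congrArg List.tail ht
      simpa [List.tail_drop] using this
    simp only [pvFindLoop, pv_isInParens_eq s i, ← ht, hget, Bool.not_not]
    by_cases hcond : (pvBal (c :: t') && q c) = true
    · simp [pvFirstQ, hcond]
    · have hcond' : (pvBal (c :: t') && q c) = false := by simpa using hcond
      rw [show ((i : Int) + 1) = ((i + 1 : Nat) : Int) by push_cast; ring]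
      rw [ih (i + 1) hdrop' (by omega)]
      simp [pvFirstQ, hcond']

-- keep-the-first-found combinator for B's fold invariant
def pvKeep (f : Int) (o : Option Nat) : Int :=
  if f < 0 then (match o with | some n => (n : Int) | none => f) else f

theorem pv_foldB_eq (O C : Int) : ∀ (t : List Char) (i : Nat) (po pc f1 f2 f3 : Int),
    O - po = (t.count '(' : Int) → C - pc = (t.count ')' : Int) →
    t.foldl (pvStepB O C) ((i : Int), po, pc, f1, f2, f3)
      = (((i + t.length : Nat) : Int), po + (t.count '(' : Int), pc + (t.count ')' : Int),
         pvKeep f1 (pvFirstQ pvQ1 i t), pvKeep f2 (pvFirstQ pvQ2 i t),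
         pvKeep f3 (pvFirstQ (fun _ => true) i t)) := by
  have hq1 : pvQ1 = (fun ch => !('a' ≤ ch && ch ≤ 'z') && !(ch == '~')) := by
    funext ch
    unfold pvQ1
    rw [pv_consts_range, Bool.and_comm]
  have hq2 : pvQ2 = (fun ch => !('a' ≤ ch && ch ≤ 'z')) := by
    funext ch
    unfold pvQ2
    rw [pv_consts_range]
  rw [hq1, hq2]
  intro t
  induction t with
  | nil => intro i po pc f1 f2 f3 _ _; simp [pvFirstQ, pvKeep]
  | cons c t' ih =>
    intro i po pc f1 f2 f3 hO hC
    have hbal : (O - po == C - pc) = pvBal (c :: t') := by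
      simp only [pvBal, hO, hC]
      by_cases h : (c :: t').count '(' = (c :: t').count ')' <;> simp [h] <;> omega
    simp only [List.foldl_cons]
    rw [show pvStepB O C ((i : Int), po, pc, f1, f2, f3) c
        = ((i : Int) + 1, (if c == '(' then po + 1 else po),
           (if !(c == '(') && c == ')' then pc + 1 else pc),
           (if O - po == C - pc then
              (if f1 < 0 && !('a' ≤ c && c ≤ 'z') && !(c == '~') then (i : Int) else f1) else f1),
           (if O - po == C - pc then
              (if f2 < 0 && !('a' ≤ c && c ≤ 'z') then (i : Int) else f2) else f2),
           (if O - po == C - pc then (if f3 < 0 then (i : Int) else f3) else f3)) from rfl]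
    have hOC : O - (if c == '(' then po + 1 else po) = (t'.count '(' : Int) := by
      by_cases h : c = '(' <;> simp [h] at hO ⊢ <;> omega
    have hCC : C - (if !(c == '(') && c == ')' then pc + 1 else pc) = (t'.count ')' : Int) := by
      by_cases h : c = ')'
      · have h' : ¬ (c = '(') := by rw [h]; decide
        simp [h, h'] at hC ⊢; omega
      · by_cases h' : c = '(' <;> simp [h, h'] at hC ⊢ <;> omega
    rw [show (i : Int) + 1 = ((i + 1 : Nat) : Int) by push_cast; ring]
    rw [ih (i + 1) _ _ _ _ _ hOC hCC]
    have hcomp : ∀ (q : Char → Bool) (f : Int),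
        pvKeep (if O - po == C - pc then (if f < 0 && q c then (i : Int) else f) else f)
            (pvFirstQ q (i + 1) t')
          = pvKeep f (pvFirstQ q i (c :: t')) := by
      intro q f
      rw [hbal]
      by_cases hb : pvBal (c :: t') = true
      · by_cases hq : q c = true
        · by_cases hf : f < 0
          · simp [hb, hq, hf, pvKeep, pvFirstQ]
          · simp [hb, hq, hf, pvKeep, pvFirstQ]
        · have hq' : q c = false := by simpa using hq
          simp only [pvFirstQ, hb, hq', Bool.and_false, Bool.true_and, if_false]
          simp [hb]
      · have hb' : pvBal (c :: t') = false := by simpa using hb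
        simp only [pvFirstQ, hb', Bool.false_and, if_false]
        simp [hb']
    simp only [Prod.mk.injEq]
    refine ⟨by push_cast [List.length_cons]; omega, ?_, ?_, ?_, ?_, ?_⟩
    · by_cases h : c = '(' <;> simp [h, List.count_cons] <;> push_cast <;> omega
    · by_cases h : c = ')'
      · have h' : ¬ (c = '(') := by rw [h]; decide
        simp [h, h', List.count_cons]; push_cast; omega
      · by_cases h' : c = '(' <;> simp [h, h', List.count_cons] <;> push_cast <;> omega
    · have h := hcomp (fun ch => !('a' ≤ ch && ch ≤ 'z') && !(ch == '~')) f1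
      simp only [Bool.and_assoc]
      simpa using h
    · simpa using hcomp (fun ch => !('a' ≤ ch && ch ≤ 'z')) f2
    · have := hcomp (fun _ => true) f3
      simpa using this

-- ===== VERDICT (by name: the statement is the Claim_ definition above) =====
theorem index_of_first_thing_to_deal_with_spec : Claim_equal_index_of_first_thing_to_deal_with := by
  intro in_str _
  unfold Spec_index_of_first_thing_to_deal_with
  unfold index_of_first_thing_to_deal_with index_of_first_thing_to_deal_with_alt
  simp only []
  set s := in_str.toList with hs
  -- B's fold, by the invariant
  have hO : (PySem.Chars.count s ['('] : Int) - 0 = (s.count '(' : Int) := by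
    rw [pv_count_single]; ring
  have hC : (PySem.Chars.count s [')'] : Int) - 0 = (s.count ')' : Int) := by
    rw [pv_count_single]; ring
  have hB := pv_foldB_eq (PySem.Chars.count s ['(']) (PySem.Chars.count s [')'])
    s 0 0 0 (-1) (-1) (-1) hO hC
  rw [show ((0:Nat):Int) = (0:Int) from rfl] at hB
  rw [hB]
  -- A's three loops, via pvFirstQ
  have e1 : (fun j => !pvIsInParens j s && !(PySem.List.pyGetD s j ' ' == '~')
        && !(pvPropositionalConstants.contains (PySem.List.pyGetD s j ' ')))
      = (fun j => !pvIsInParens j s && pvQ1 (PySem.List.pyGetD s j ' ')) := by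
    funext j
    simp [pvQ1, Bool.and_assoc]
  have e2 : (fun j => !pvIsInParens j s
        && !(pvPropositionalConstants.contains (PySem.List.pyGetD s j ' ')))
      = (fun j => !pvIsInParens j s && pvQ2 (PySem.List.pyGetD s j ' ')) := by
    funext j
    simp [pvQ2]
  have e3 : (fun j => !pvIsInParens j s)
      = (fun j => !pvIsInParens j s && (fun _ : Char => true) (PySem.List.pyGetD s j ' ')) := by
    funext j
    simp
  have L1 := pv_loopA_eq s pvQ1 s 0 rfl (Nat.zero_le _)
  have L2 := pv_loopA_eq s pvQ2 s 0 rfl (Nat.zero_le _)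
  have L3 := pv_loopA_eq s (fun _ => true) s 0 rfl (Nat.zero_le _)
  rw [show ((0:Nat):Int) = (0:Int) from rfl] at L1 L2 L3
  rw [e1, L1, e2, L2, e3, L3]
  -- case analysis on the three first-index options
  by_cases hnil : s = []
  · simp [hnil, pvFirstQ, pvKeep]
  · have hlen : ¬ (s.length = 0) := by simpa [List.length_eq_zero_iff] using hnil
    simp only [hlen, if_false]
    cases h1 : pvFirstQ pvQ1 0 s with
    | some n =>
      simp [pvKeep, show ¬ ((n : Int) < 0) by omega]
    | none =>
      cases h2 : pvFirstQ pvQ2 0 s with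
      | some n =>
        simp [pvKeep, show ¬ ((n : Int) < 0) by omega]
      | none =>
        cases h3 : pvFirstQ (fun _ => true) 0 s with
        | some n =>
          simp [pvKeep, show ¬ ((n : Int) < 0) by omega]
        | none =>
          simp [pvKeep]
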